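-- pv_equiv track=rewrite | github.com/jung-jinyoung/algostudy2025 | 2504/6주차(250422)/이현복/디펜스 게임.py | solution
-- ===== SOURCE A (Python) =====
-- import heapq
--
-- def solution(n, k, enemy):
--     answer = 0
--     stages = len(enemy)
--     if sum(enemy)<=n:
--         return stages
--     else:
--         pq = []
--         for idx,E in enumerate(enemy):
--             heapq.heappush(pq,-E)
--             n-=E
--             if n<0 and k>0:
--                 n -= heapq.heappop(pq)
--                 k-=1
--             if n<0:
--                 return idx
--         else:
--             return stages
-- ===== SOURCE B (Python) =====
-- import heapq
--
-- def solution(n, k, enemy):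
--     stages = len(enemy)
--     if sum(enemy) <= n:
--         return stages
--
--     def feasible(m):
--         pre = enemy[:m]
--         drop = sum(pre) if k >= m else sum(heapq.nlargest(k, pre))
--         return sum(pre) - drop <= n
--
--     lo, hi = 0, stages
--     while lo < hi:
--         mid = (lo + hi + 1) // 2
--         if feasible(mid):
--             lo = mid
--         else:
--             hi = mid - 1
--     return lo
-- ===== Notes on version B (the rewrite author's own statement) =====
-- stated objective: alternative
-- what changed: Replaces A's incremental lazy-greedy heap simulation (push each damage, on overflow pop the largest seen) by a binary search over the number of stages m with the closed feasibility test sum(enemy[:m]) - sum(k largest of enemy[:m]) <= n, which is monotone for nonnegative damages.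
-- outside the precondition, e.g. on solution(0, 2, [1, -20, 10, 5, 11, 6]): A returns 5, B returns 6
import Mathlib
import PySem

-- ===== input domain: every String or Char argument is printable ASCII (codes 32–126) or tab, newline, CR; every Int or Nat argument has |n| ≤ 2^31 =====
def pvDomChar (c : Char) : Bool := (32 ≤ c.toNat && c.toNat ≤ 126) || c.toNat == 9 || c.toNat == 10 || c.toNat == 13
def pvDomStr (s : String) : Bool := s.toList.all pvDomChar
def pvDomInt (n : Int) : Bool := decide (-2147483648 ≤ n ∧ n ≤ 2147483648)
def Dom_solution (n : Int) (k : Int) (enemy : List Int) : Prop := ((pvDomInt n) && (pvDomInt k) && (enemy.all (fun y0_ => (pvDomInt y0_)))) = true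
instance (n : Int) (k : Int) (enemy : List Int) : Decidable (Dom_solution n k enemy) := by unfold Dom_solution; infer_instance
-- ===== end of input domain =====

-- B replaces A's lazy-greedy heap simulation with a binary search over the stage count using the
-- sort-based feasibility test "prefix sum minus its k largest damages fits in n" (objective: alternative).


-- ===== PORT A =====
-- heapq is used by A only through heappush/heappop on a list of NEGATED damages: observable
-- behaviour is "push an element; pop returns the minimum and removes one occurrence of it".
-- The port keeps pq as a plain list: push = cons, pop = (minimum, erase first occurrence of it);
-- this is exact for the popped value and the remaining multiset (the heap layout is unobservable).
def solutionGo (n : Int) (k : Int) (pq : List Int) (idx : Int) (rest : List Int) (stages : Int) : Int :=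
  match rest with
  | [] => stages
  | e :: tl =>
    let pq1 := (-e) :: pq
    let n1 := n - e
    if n1 < 0 ∧ 0 < k then
      let m := pq.foldl min (-e)     -- heappop of pq1: its minimum
      let n2 := n1 - m
      if n2 < 0 then idx
      else solutionGo n2 (k - 1) (pq1.erase m) (idx + 1) tl stages
    else if n1 < 0 then idx
    else solutionGo n1 k pq1 (idx + 1) tl stages

def solution (n : Int) (k : Int) (enemy : List Int) : Int :=
  let stages : Int := enemy.length
  if enemy.sum ≤ n then stages
  else solutionGo n k [] 0 enemy stages

-- ===== PORT B =====
-- heapq.nlargest(k, xs) is the k largest elements in descending order (empty for k ≤ 0);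
-- only its SUM is used, ported as sorted(xs, reverse=True)[:k] with k clamped at 0.
def nlargestSum (k : Int) (l : List Int) : Int :=
  ((PySem.List.sorted l (fun x => x) true).take k.toNat).sum

def bFeasible (n : Int) (k : Int) (enemy : List Int) (m : Int) : Bool :=
  let pre := PySem.List.slice enemy none (some m)
  let drop := if m ≤ k then pre.sum else nlargestSum k pre
  decide (pre.sum - drop ≤ n)

-- midpoint bracket for the binary search's termination (cited in decreasing_by)
theorem bSearch_mid_bounds {lo hi : Int} (h : lo < hi) :
    lo < PySem.Int.floordiv (lo + hi + 1) 2 ∧ PySem.Int.floordiv (lo + hi + 1) 2 ≤ hi := by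
  rw [PySem.Int.floordiv_eq_ediv_of_pos (by omega)]; omega

def bSearch (n : Int) (k : Int) (enemy : List Int) (lo hi : Int) : Int :=
  if h : lo < hi then
    if bFeasible n k enemy (PySem.Int.floordiv (lo + hi + 1) 2) then
      bSearch n k enemy (PySem.Int.floordiv (lo + hi + 1) 2) hi
    else
      bSearch n k enemy lo (PySem.Int.floordiv (lo + hi + 1) 2 - 1)
  else lo
termination_by (hi - lo).toNat
decreasing_by
  · have := bSearch_mid_bounds h; omega
  · have := bSearch_mid_bounds h; omega

def solution_alt (n : Int) (k : Int) (enemy : List Int) : Int :=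
  let stages : Int := enemy.length
  if enemy.sum ≤ n then stages
  else bSearch n k enemy 0 stages

-- ===== PRECONDITION & SPEC =====
-- Pre_ restricts to the game's natural domain of nonnegative per-stage damages: with negative
-- damages A's lazy-shield greedy and B's monotone-feasibility binary search genuinely diverge
-- (see the cited example), and neither value is the specified one for a defense game.
def Pre_solution (n : Int) (k : Int) (enemy : List Int) : Prop := ∀ x ∈ enemy, 0 ≤ x
instance (n : Int) (k : Int) (enemy : List Int) : Decidable (Pre_solution n k enemy) := by
  unfold Pre_solution; infer_instance

def pvWitness_solution : Int × Int × List Int := (10, 1, [5, 6, 3])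

def Spec_solution (n : Int) (k : Int) (enemy : List Int) (out : Int) : Prop := out = solution_alt n k enemy
instance (n : Int) (k : Int) (enemy : List Int) (out : Int) : Decidable (Spec_solution n k enemy out) := by unfold Spec_solution; infer_instance

-- ===== CLAIM (what is proved, stated in full; the proofs are below) =====
def Claim_equal_solution : Prop := ∀ (n : Int) (k : Int) (enemy : List Int), Dom_solution n k enemy → Pre_solution n k enemy → Spec_solution n k enemy (solution n k enemy)

-- ===== LEMMAS AND PROOFS =====

-- the feasibility predicate at prefix length m (B's test, over List.take)
def feasP (n : Int) (k : Int) (enemy : List Int) (m : Int) : Prop :=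
  (enemy.take m.toNat).sum - nlargestSum k (enemy.take m.toNat) ≤ n

-- characterization shared by both programs' else-branch results
def ResChar (n : Int) (k : Int) (enemy : List Int) (r : Int) : Prop :=
  (∀ m : Int, 1 ≤ m → m ≤ r → feasP n k enemy m) ∧
  (r = enemy.length ∨ ¬ feasP n k enemy (r + 1)) ∧
  0 ≤ r ∧ r ≤ enemy.length

-- when every stage of the prefix can be shielded, the k largest are the whole prefix
theorem nlargestSum_all (k : Int) (l : List Int) (h : l.length ≤ k.toNat) :
    nlargestSum k l = l.sum := by
  unfold nlargestSum
  rw [List.take_of_length_le (by rw [PySem.List.length_sorted]; exact h)]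
  exact List.Perm.sum_eq (PySem.List.sorted_perm ..)

theorem bFeasible_eq (n k : Int) (enemy : List Int) (m : Int) (hm : 0 ≤ m) :
    bFeasible n k enemy m = true ↔ feasP n k enemy m := by
  simp only [bFeasible, feasP, PySem.List.slice_to _ hm, decide_eq_true_eq]
  by_cases hk : m ≤ k
  · rw [if_pos hk, nlargestSum_all k _ (by
      have := List.length_take_le m.toNat enemy
      omega)]
  · rw [if_neg hk]

-- any sub-multiset of a nonneg list with at most j elements is dominated by the j largest
theorem takeStep (a : Int) : ∀ (s : List Int) (j : Nat), (∀ x ∈ s, x ≤ a) → 0 ≤ a →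
    (s.take (j+1)).sum ≤ a + (s.take j).sum := by
  intro s
  induction s with
  | nil => intro j _ ha; simp [ha]
  | cons b t ih =>
    intro j hb ha
    match j with
    | 0 => simpa using hb b (by simp)
    | j'+1 =>
      have := ih j' (fun x hx => hb x (by simp [hx])) ha
      simp only [List.take_succ_cons, List.sum_cons] at *
      linarith

theorem sum_le_takeSum (s : List Int) (hs : s.Pairwise (fun a b => b ≤ a))
    (hnn : ∀ x ∈ s, 0 ≤ x) (T : Multiset Int) (hT : T ≤ (s : Multiset Int))
    (j : Nat) (hc : T.card ≤ j) : T.sum ≤ (s.take j).sum := by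
  induction s generalizing T j with
  | nil =>
    have : T = 0 := by simpa using hT
    simp [this]
  | cons a t ih =>
    rw [List.pairwise_cons] at hs
    by_cases hmem : a ∈ T
    · match j with
      | 0 =>
        exfalso
        have : T = 0 := Multiset.card_eq_zero.mp (Nat.le_zero.mp hc)
        simp [this] at hmem
      | j'+1 =>
        have hT' : T.erase a ≤ (t : Multiset Int) := by
          rw [Multiset.erase_le_iff_le_cons]
          simpa using hT
        have hc' : (T.erase a).card ≤ j' := by
          have h1 := Multiset.card_erase_of_mem hmem
          have h2 : 0 < T.card := Multiset.card_pos.mpr (by rintro rfl; simp at hmem)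
          rw [Nat.pred_eq_sub_one] at h1
          omega
        have ihres := ih hs.2 (fun x hx => hnn x (by simp [hx])) (T.erase a) hT' j' hc'
        have hsum : T.sum = a + (T.erase a).sum := by
          conv_lhs => rw [← Multiset.cons_erase hmem]
          simp
        simp only [List.take_succ_cons, List.sum_cons]
        omega
    · have hT' : T ≤ (t : Multiset Int) := by
        have h2 : T ≤ a ::ₘ (t : Multiset Int) := by simpa using hT
        exact (Multiset.le_cons_of_notMem hmem).mp h2
      have ihres := ih hs.2 (fun x hx => hnn x (by simp [hx])) T hT' j hc
      match j with
      | 0 => simpa using ihres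
      | j'+1 =>
        have := takeStep a t j' (fun x hx => hs.1 x hx) (hnn a (by simp))
        simp only [List.take_succ_cons, List.sum_cons]
        omega

theorem nlargestSum_ge (k : Int) (l : List Int) (hnn : ∀ x ∈ l, 0 ≤ x)
    (T : Multiset Int) (hT : T ≤ (l : Multiset Int)) (hc : T.card ≤ k.toNat) :
    T.sum ≤ nlargestSum k l := by
  have hperm : ((PySem.List.sorted l (fun x => x) true : List Int) : Multiset Int) = (l : Multiset Int) :=
    Multiset.coe_eq_coe.mpr (PySem.List.sorted_perm ..)
  exact sum_le_takeSum _ (PySem.List.sorted_pairwise_rev ..)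
    (fun x hx => hnn x ((PySem.List.mem_sorted ..).mp hx)) T (by rw [hperm]; exact hT) _ hc

theorem nlargestSum_exists (k : Int) (l : List Int) :
    ∃ T : Multiset Int, T ≤ (l : Multiset Int) ∧ T.card ≤ k.toNat ∧ T.sum = nlargestSum k l := by
  have hperm : ((PySem.List.sorted l (fun x => x) true : List Int) : Multiset Int) = (l : Multiset Int) :=
    Multiset.coe_eq_coe.mpr (PySem.List.sorted_perm ..)
  refine ⟨((PySem.List.sorted l (fun x => x) true).take k.toNat : List Int), ?_, ?_, ?_⟩
  · rw [← hperm]; exact Multiset.coe_le.mpr (List.take_sublist ..).subperm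
  · simpa using List.length_take_le ..
  · simp [nlargestSum]

-- counting bound used at A's exhausted-shields failure
theorem count_bound (P H : Multiset Int) (e μ : Int) (T : Multiset Int)
    (hT : T ≤ P + H + {e}) (hc : T.card ≤ P.card) (hμ0 : 0 ≤ μ)
    (hμP : ∀ y ∈ P, μ ≤ y) (hμH : ∀ x ∈ H, x ≤ μ) :
    T.sum ≤ P.sum + max 0 (e - μ) := by
  have hTP : T ∩ P ≤ P := Multiset.inter_le_right ..
  have h1 : T - P ≤ H + {e} := by
    rw [Multiset.sub_le_iff_le_add]
    calc T ≤ P + H + {e} := hT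
    _ = H + {e} + P := by abel
  have hTe : (T - P) - H ≤ {e} := by
    rw [Multiset.sub_le_iff_le_add]
    calc T - P ≤ H + {e} := h1
    _ = {e} + H := by abel
  have hTH : (T - P) ∩ H ≤ H := Multiset.inter_le_right ..
  have hsplit1 : T - P + T ∩ P = T := Multiset.sub_add_inter ..
  have hsplit2 : (T - P) - H + (T - P) ∩ H = T - P := Multiset.sub_add_inter ..
  set TP := T ∩ P with hTPdef
  set TH := (T - P) ∩ H with hTHdef
  set Te := (T - P) - H with hTedef
  have hsumP : P.sum = TP.sum + (P - TP).sum := by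
    conv_lhs => rw [← Multiset.sub_add_cancel hTP]
    rw [Multiset.sum_add]; ring
  have hPml : ((P - TP).card : Int) * μ ≤ (P - TP).sum := by
    have := Multiset.card_nsmul_le_sum
      (fun x hx => hμP x (Multiset.mem_of_le (Multiset.sub_le_self ..) hx)) (s := P - TP)
    simpa [nsmul_eq_mul] using this
  have hTHle : TH.sum ≤ (TH.card : Int) * μ := by
    have := Multiset.sum_le_card_nsmul TH μ (fun x hx => hμH x (Multiset.mem_of_le hTH hx))
    simpa [nsmul_eq_mul] using this
  have hcardP : (P - TP).card = P.card - TP.card := Multiset.card_sub hTP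
  have hcards : Te.card + TH.card + TP.card = T.card := by
    have e2 := congrArg Multiset.card hsplit2
    have e1 := congrArg Multiset.card hsplit1
    simp only [Multiset.card_add] at e1 e2
    omega
  have hTsum : T.sum = Te.sum + TH.sum + TP.sum := by
    have e2 := congrArg Multiset.sum hsplit2
    have e1 := congrArg Multiset.sum hsplit1
    rw [Multiset.sum_add] at e1 e2
    linarith
  have hcTP : TP.card ≤ P.card := Multiset.card_le_card hTP
  have hmono : ∀ a b : Nat, a ≤ b → (a : Int) * μ ≤ (b : Int) * μ := by
    intro a b hab
    exact mul_le_mul_of_nonneg_right (by exact_mod_cast hab) hμ0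
  rcases Multiset.le_singleton.mp hTe with h0 | h1e
  · have hTe0 : Te.sum = 0 := by rw [h0]; simp
    have hTec : Te.card = 0 := by rw [h0]; simp
    have hb : TH.card ≤ (P - TP).card := by omega
    have h2 := hmono _ _ hb
    have hmax : (0:Int) ≤ max 0 (e - μ) := le_max_left ..
    linarith
  · have hTe0 : Te.sum = e := by rw [h1e]; simp
    have hTec : Te.card = 1 := by rw [h1e]; simp
    have hb : TH.card + 1 ≤ (P - TP).card := by omega
    have h2 := hmono _ _ hb
    have hmax : e - μ ≤ max 0 (e - μ) := le_max_right ..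
    push_cast at h2
    linarith

theorem nlargestSum_append_le (k : Int) (l : List Int) (a : Int)
    (hnn : ∀ x ∈ l, 0 ≤ x) (ha : 0 ≤ a) :
    nlargestSum k (l ++ [a]) ≤ nlargestSum k l + a := by
  obtain ⟨T, hT, hc, hsum⟩ := nlargestSum_exists k (l ++ [a])
  rw [← hsum]
  have hTl : T ∩ (l : Multiset Int) ≤ (l : Multiset Int) := Multiset.inter_le_right ..
  have hTa : T - (l : Multiset Int) ≤ {a} := by
    rw [Multiset.sub_le_iff_le_add]
    calc T ≤ ((l ++ [a] : List Int) : Multiset Int) := hT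
    _ = {a} + (l : Multiset Int) := by
        have : ((l ++ [a] : List Int) : Multiset Int) = (l : Multiset Int) + {a} :=
          (Multiset.cons_inj_right a).mp rfl
        rw [this, add_comm]
  have hsplit : T - (l : Multiset Int) + T ∩ (l : Multiset Int) = T := Multiset.sub_add_inter ..
  have h1 : (T ∩ (l : Multiset Int)).sum ≤ nlargestSum k l := by
    apply nlargestSum_ge k l hnn _ hTl
    calc (T ∩ (l:Multiset Int)).card ≤ T.card := Multiset.card_le_card (Multiset.inter_le_left ..)
    _ ≤ k.toNat := hc
  have h2 : (T - (l : Multiset Int)).sum ≤ a := by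
    rcases Multiset.le_singleton.mp hTa with h0 | h1e
    · rw [h0]; simpa using ha
    · rw [h1e]; simp
  have := congrArg Multiset.sum hsplit
  rw [Multiset.sum_add] at this
  linarith

theorem feas_mono (n k : Int) (enemy : List Int) (hnn : ∀ x ∈ enemy, 0 ≤ x)
    (m : Int) (h1 : 1 ≤ m) (h : feasP n k enemy (m + 1)) : feasP n k enemy m := by
  unfold feasP at *
  have hm1 : (m+1).toNat = m.toNat + 1 := by omega
  rw [hm1, List.take_succ] at h
  rcases hget : enemy[m.toNat]? with _ | a
  · rw [hget] at h; simpa using h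
  · rw [hget] at h
    have haE : a ∈ enemy := by
      obtain ⟨hlt, hEq⟩ := List.getElem?_eq_some_iff.mp hget
      exact hEq ▸ List.getElem_mem ..
    have hstep := nlargestSum_append_le k (enemy.take m.toNat) a
      (fun x hx => hnn x (List.mem_of_mem_take hx)) (hnn a haE)
    rw [List.sum_append] at h
    simp at h
    linarith

theorem feas_chain (n k : Int) (enemy : List Int) (hnn : ∀ x ∈ enemy, 0 ≤ x)
    (m m' : Int) (h1 : 1 ≤ m') (hle : m' ≤ m) (h : feasP n k enemy m) : feasP n k enemy m' := by
  have key : ∀ d : Nat, ∀ mm : Int, 1 ≤ mm → feasP n k enemy (mm + d) → feasP n k enemy mm := by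
    intro d
    induction d with
    | zero => intro mm _ h; simpa using h
    | succ d' ih =>
      intro mm hmm h
      apply feas_mono n k enemy hnn mm hmm
      have : mm + (d' + 1 : Nat) = (mm + 1) + (d' : Int) := by push_cast; ring
      rw [this] at h
      exact ih (mm + 1) (by omega) h
  have hd : m = m' + ((m - m').toNat : Int) := by omega
  exact key (m - m').toNat m' h1 (by rw [← hd]; exact h)

theorem CharP_unique (n k : Int) (enemy : List Int) (r1 r2 : Int)
    (h1 : ResChar n k enemy r1) (h2 : ResChar n k enemy r2) : r1 = r2 := by
  obtain ⟨f1, e1, lo1, hi1⟩ := h1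
  obtain ⟨f2, e2, lo2, hi2⟩ := h2
  rcases lt_trichotomy r1 r2 with hlt | heq | hgt
  · exfalso
    rcases e1 with rfl | hnf
    · omega
    · exact hnf (f2 (r1 + 1) (by omega) (by omega))
  · exact heq
  · exfalso
    rcases e2 with rfl | hnf
    · omega
    · exact hnf (f1 (r2 + 1) (by omega) (by omega))

theorem coe_append_singleton (p : List Int) (e : Int) :
    ((p ++ [e] : List Int) : Multiset Int) = e ::ₘ (p : Multiset Int) := by
  have : ((p ++ [e] : List Int) : Multiset Int) = (p : Multiset Int) + {e} := (Multiset.cons_inj_right e).mp rfl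
  rw [this]; exact (add_comm _ _).trans (Multiset.singleton_add e _)

theorem Achar (n0 k : Int) (enemy : List Int) (hnn : ∀ x ∈ enemy, 0 ≤ x) :
    ∀ (rest p pq : List Int) (P : Multiset Int) (n' k' : Int),
      enemy = p ++ rest →
      ((pq.map (fun x => -x) : List Int) : Multiset Int) + P = (p : Multiset Int) →
      n' = n0 - p.sum + P.sum →
      k' = k - P.card →
      (P ≠ 0 → 0 ≤ k') →
      (P ≠ 0 → ∃ μ, μ ∈ P ∧ n' < μ ∧ (∀ y ∈ P, μ ≤ y) ∧ (∀ x ∈ pq, -x ≤ μ)) →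
      (p ≠ [] → 0 ≤ n') →
      (∀ m : Int, 1 ≤ m → m ≤ (p.length : Int) → feasP n0 k enemy m) →
      ResChar n0 k enemy (solutionGo n' k' pq (p.length : Int) rest (enemy.length : Int)) := by
  intro rest
  induction rest with
  | nil =>
    intro p pq P n' k' hsplit hheap hn hk hknn hbound hn0 hfeas
    have hp : p = enemy := by simpa using hsplit.symm
    simp only [solutionGo]
    exact ⟨fun m h1 h2 => hfeas m h1 (by rw [hp]; exact h2), Or.inl rfl, by positivity, le_refl _⟩
  | cons e tl ih =>
    intro p pq P n' k' hsplit hheap hn hk hknn hbound hn0 hfeas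
    have he_mem : e ∈ enemy := by rw [hsplit]; simp
    have he0 : 0 ≤ e := hnn e he_mem
    have hp_nn : ∀ x ∈ p, 0 ≤ x := fun x hx => hnn x (by rw [hsplit]; simp [hx])
    have hpe_nn : ∀ x ∈ p ++ [e], 0 ≤ x := by
      intro x hx
      rcases List.mem_append.mp hx with h | h
      · exact hp_nn x h
      · simp at h; omega
    have htake : enemy.take (p.length + 1) = p ++ [e] := by
      rw [hsplit]; simp [List.take_append]
    have hlenE : (enemy.length : Int) = (p.length : Int) + 1 + tl.length := by
      rw [hsplit]; push_cast [List.length_append, List.length_cons]; ring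
    have hPsub : P ≤ (p : Multiset Int) := by rw [← hheap]; exact Multiset.le_add_left ..
    have hPnn : ∀ y ∈ P, 0 ≤ y := fun y hy => hp_nn y (by
      have := Multiset.mem_of_le hPsub hy; simpa using this)
    have hpe_coe : ((p ++ [e] : List Int) : Multiset Int) = e ::ₘ (p : Multiset Int) :=
      coe_append_singleton p e
    -- feasibility of the extended prefix from a surviving state
    have hfeas_new : ∀ (P'' : Multiset Int) (n'' : Int), P'' ≤ ((p ++ [e] : List Int) : Multiset Int) →
        P''.card ≤ k.toNat → n'' = n0 - (p.sum + e) + P''.sum → 0 ≤ n'' →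
        feasP n0 k enemy ((p.length : Int) + 1) := by
      intro P'' n'' hle hcard hneq hpos
      unfold feasP
      have ht : ((p.length : Int) + 1).toNat = p.length + 1 := by omega
      rw [ht, htake]
      have hge := nlargestSum_ge k (p ++ [e]) hpe_nn P'' hle hcard
      rw [List.sum_append]
      simp only [List.sum_cons, List.sum_nil, add_zero]
      linarith
    have hextend : feasP n0 k enemy ((p.length : Int) + 1) →
        ∀ m : Int, 1 ≤ m → m ≤ ((p ++ [e]).length : Int) → feasP n0 k enemy m := by
      intro hnew m h1 h2
      simp only [List.length_append, List.length_cons, List.length_nil] at h2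
      push_cast at h2
      by_cases hm : m = (p.length : Int) + 1
      · rw [hm]; exact hnew
      · exact hfeas m h1 (by omega)
    have hplen1 : (((p ++ [e]).length : Nat) : Int) = (p.length : Int) + 1 := by
      simp
    simp only [solutionGo]
    by_cases hc1 : n' - e < 0 ∧ 0 < k'
    · rw [if_pos hc1]
      -- pop branch
      set mq := pq.foldl min (-e) with hmq
      have hmin_eq : PySem.List.min? ((-e) :: pq) (fun x => x) = some mq := PySem.List.min?_id_cons ..
      have hmem_mq : mq ∈ (-e) :: pq := PySem.List.min?_mem hmin_eq
      have hmin_le : ∀ y ∈ (-e) :: pq, mq ≤ y := by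
        have := PySem.List.min?_isMin hmin_eq; simpa using this
      have he_le : mq ≤ -e := hmin_le (-e) (by simp)
      by_cases hc2 : n' - e - mq < 0
      · rw [if_pos hc2]
        -- irrecoverable failure: only possible on the very first stage with n0 < 0
        have hn'neg : n' < 0 := by omega
        have hpnil : p = [] := by
          by_contra h
          exact absurd (hn0 h) (by omega)
        subst hpnil
        have hz : pq = [] ∧ P = 0 := by simpa using hheap
        have hpq : pq = [] := hz.1
        have hP0 : P = 0 := hz.2
        have hn0eq : n' = n0 := by simp [hP0] at hn; omega
        have hk0 : k' = k := by simp [hP0] at hk; omega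
        refine ⟨fun m h1 h2 => by simp at h2; omega, Or.inr ?_, by simp, by simp⟩
        -- ¬ feasP at prefix length 1
        intro hcontra
        unfold feasP at hcontra
        have ht1 : ((0 : Int) + 1).toNat = 1 := by omega
        rw [List.length_nil] at hcontra
        simp only [Nat.cast_zero, ht1] at hcontra
        have htk : enemy.take 1 = [e] := by rw [hsplit]; simp
        rw [htk] at hcontra
        have hsorted : PySem.List.sorted [e] (fun x => x) true = [e] :=
          List.perm_singleton.mp (PySem.List.sorted_perm ..)
        have hkpos : 0 < k := by omega
        have hnl : nlargestSum k [e] = e := by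
          unfold nlargestSum
          rw [hsorted, List.take_of_length_le (by simp; omega)]
          simp
        rw [hnl] at hcontra
        simp at hcontra
        omega
      · rw [if_neg hc2]
        -- successful shield use: recurse with the popped maximum moved into P
        have hmemX : (-mq) ∈ (((((-e) :: pq).map (fun x => -x)) : List Int) : Multiset Int) := by
          simp only [Multiset.mem_coe, List.mem_map]
          exact ⟨mq, hmem_mq, rfl⟩
        have hheap' : (((((-e) :: pq).erase mq).map (fun x => -x) : List Int) : Multiset Int) + ((-mq) ::ₘ P)
            = ((p ++ [e] : List Int) : Multiset Int) := by
          have hstep : ((((-e) :: pq).erase mq).map (fun x => -x) : List Int) =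
              (((-e) :: pq).map (fun x => -x) : List Int).erase (-mq) := by
            have hinj : Function.Injective (fun x : Int => -x) := fun a b h => by simpa using h
            exact List.map_erase hinj _
          rw [hstep]
          have hcoeE : ((((-e) :: pq).map (fun x => -x) : List Int).erase (-mq) : Multiset Int)
              = ((((-e) :: pq).map (fun x => -x) : List Int) : Multiset Int).erase (-mq) :=
            (Multiset.coe_erase ..)
          rw [hcoeE]
          have : ((((-e) :: pq).map (fun x => -x) : List Int) : Multiset Int).erase (-mq) + ((-mq) ::ₘ P)
              = (-mq) ::ₘ ((((-e) :: pq).map (fun x => -x) : List Int) : Multiset Int).erase (-mq) + P := by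
            rw [Multiset.add_cons, Multiset.cons_add]
          rw [this, Multiset.cons_erase hmemX]
          have hconsmap : (((-e) :: pq).map (fun x => -x) : List Int) = e :: pq.map (fun x => -x) := by
            simp
          rw [hconsmap, hpe_coe]
          have : ((e :: pq.map (fun x => -x) : List Int) : Multiset Int)
              = e ::ₘ ((pq.map (fun x => -x) : List Int) : Multiset Int) := rfl
          rw [this, Multiset.cons_add, hheap]
        -- bound data for the new popped multiset
        have hboundE : ∀ x ∈ ((-e) :: pq).erase mq, -x ≤ -mq := by
          intro x hx
          have := hmin_le x (List.mem_of_mem_erase hx)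
          omega
        have hbound' : ∃ μ, μ ∈ ((-mq) ::ₘ P) ∧ (n' - e - mq) < μ ∧ (∀ y ∈ ((-mq) ::ₘ P), μ ≤ y) ∧
            (∀ x ∈ ((-e) :: pq).erase mq, -x ≤ μ) := by
          by_cases hP0 : P = 0
          · subst hP0
            exact ⟨-mq, by simp, by omega, by simp, hboundE⟩
          · obtain ⟨μ, hμmem, hμn, hμP, hμpq⟩ := hbound hP0
            refine ⟨min μ (-mq), ?_, ?_, ?_, ?_⟩
            · rcases min_choice μ (-mq) with hmc | hmc <;> rw [hmc]
              · exact Multiset.mem_cons_of_mem hμmem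
              · exact Multiset.mem_cons_self ..
            · rcases List.mem_cons.mp hmem_mq with hcase | hcase
              · have : mq = -e := hcase
                apply lt_min (by omega) (by omega)
              · exact lt_min (by have := hμpq mq hcase; omega) (by omega)
            · intro y hy
              rcases Multiset.mem_cons.mp hy with rfl | hyP
              · exact min_le_right ..
              · exact le_trans (min_le_left ..) (hμP y hyP)
            · intro x hx
              refine le_min ?_ (hboundE x hx)
              rcases List.mem_cons.mp (List.mem_of_mem_erase hx) with rfl | hxpq
              · -- x = -e, so -x = e
                rcases List.mem_cons.mp hmem_mq with hcase | hcase
                · -- mq = -e: the erased element is the head, so x ∈ pq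
                  have hxpq' : (-e) ∈ pq := by
                    rw [hcase] at hx
                    rwa [List.erase_cons_head] at hx
                  exact hμpq _ hxpq'
                · have := hμpq mq hcase
                  omega
              · exact hμpq x hxpq
        -- feasibility of the new prefix
        have hcard' : ((-mq) ::ₘ P).card ≤ k.toNat := by
          have h1 : 0 < k' := hc1.2
          have := Multiset.card_cons (-mq) P
          omega
        have hP'le : ((-mq) ::ₘ P) ≤ ((p ++ [e] : List Int) : Multiset Int) := by
          rw [← hheap']
          exact Multiset.le_add_left ..
        have hfeasnew := hfeas_new ((-mq) ::ₘ P) (n' - e - mq) hP'le hcard'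
          (by rw [Multiset.sum_cons]; omega) (by omega)
        have ihres := ih (p ++ [e]) (((-e) :: pq).erase mq) ((-mq) ::ₘ P) (n' - e - mq) (k' - 1)
          (by rw [hsplit, List.append_assoc]; rfl)
          hheap'
          (by rw [Multiset.sum_cons, List.sum_append]; simp; omega)
          (by rw [Multiset.card_cons]; push_cast; omega)
          (fun _ => by omega)
          (fun _ => hbound')
          (fun _ => by omega)
          (hextend hfeasnew)
        rw [hplen1] at ihres
        exact ihres
    · rw [if_neg hc1]
      by_cases hc3 : n' - e < 0
      · rw [if_pos hc3]
        -- A fails here with no shields left: the extended prefix is infeasible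
        have hk'le : k' ≤ 0 := by
          by_contra h
          exact hc1 ⟨hc3, by omega⟩
        have hnf : ¬ feasP n0 k enemy ((p.length : Int) + 1) := by
          unfold feasP
          have ht : ((p.length : Int) + 1).toNat = p.length + 1 := by omega
          rw [ht, htake, List.sum_append]
          simp only [List.sum_cons, List.sum_nil, add_zero]
          by_cases hP0 : P = 0
          · have hkk : k = k' := by simp [hP0] at hk; omega
            have hk0 : k.toNat = 0 := by omega
            have hnl : nlargestSum k (p ++ [e]) = 0 := by
              unfold nlargestSum
              rw [hk0]
              simp
            rw [hnl]
            simp [hP0] at hn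
            omega
          · obtain ⟨μ, hμmem, hμn, hμP, hμpq⟩ := hbound hP0
            have hμ0 : 0 ≤ μ := hPnn μ hμmem
            have hk'0 : k' = 0 := le_antisymm hk'le (hknn hP0)
            have hkP : k = P.card := by omega
            obtain ⟨T, hTle, hTc, hTsum⟩ := nlargestSum_exists k (p ++ [e])
            have hTle' : T ≤ P + ((pq.map (fun x => -x) : List Int) : Multiset Int) + {e} := by
              calc T ≤ ((p ++ [e] : List Int) : Multiset Int) := hTle
              _ = (p : Multiset Int) + {e} := (Multiset.cons_inj_right e).mp rfl
              _ = P + ((pq.map (fun x => -x) : List Int) : Multiset Int) + {e} := by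
                  rw [← hheap]; abel
            have hTc' : T.card ≤ P.card := by omega
            have hμH : ∀ x ∈ ((pq.map (fun x => -x) : List Int) : Multiset Int), x ≤ μ := by
              intro x hx
              simp only [Multiset.mem_coe, List.mem_map] at hx
              obtain ⟨y, hy, rfl⟩ := hx
              exact hμpq y hy
            have hcb := count_bound P _ e μ T hTle' hTc' hμ0 hμP hμH
            rw [← hTsum]
            rcases max_cases (0 : Int) (e - μ) with ⟨hmx, _⟩ | ⟨hmx, _⟩ <;> rw [hmx] at hcb <;> omega
        refine ⟨fun m h1 h2 => hfeas m h1 h2, Or.inr hnf, by positivity, by omega⟩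
      · rw [if_neg hc3]
        -- survive without popping
        have hn1 : 0 ≤ n' - e := by omega
        have hheap' : ((((-e) :: pq).map (fun x => -x) : List Int) : Multiset Int) + P
            = ((p ++ [e] : List Int) : Multiset Int) := by
          have hconsmap : (((-e) :: pq).map (fun x => -x) : List Int) = e :: pq.map (fun x => -x) := by
            simp
          rw [hconsmap, hpe_coe]
          have : ((e :: pq.map (fun x => -x) : List Int) : Multiset Int)
              = e ::ₘ ((pq.map (fun x => -x) : List Int) : Multiset Int) := rfl
          rw [this, Multiset.cons_add, hheap]
        have hcard' : P.card ≤ k.toNat := by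
          by_cases hP0 : P = 0
          · simp [hP0]
          · have := hknn hP0; omega
        have hP'le : P ≤ ((p ++ [e] : List Int) : Multiset Int) := by
          rw [← hheap']
          exact Multiset.le_add_left ..
        have hfeasnew := hfeas_new P (n' - e) hP'le hcard'
          (by omega) hn1
        have hbound' : P ≠ 0 → ∃ μ, μ ∈ P ∧ (n' - e) < μ ∧ (∀ y ∈ P, μ ≤ y) ∧
            (∀ x ∈ (-e) :: pq, -x ≤ μ) := by
          intro hP0
          obtain ⟨μ, hμmem, hμn, hμP, hμpq⟩ := hbound hP0
          refine ⟨μ, hμmem, by omega, hμP, ?_⟩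
          intro x hx
          rcases List.mem_cons.mp hx with rfl | hxpq
          · omega
          · exact hμpq x hxpq
        have ihres := ih (p ++ [e]) ((-e) :: pq) P (n' - e) k'
          (by rw [hsplit, List.append_assoc]; rfl)
          hheap'
          (by rw [List.sum_append]; simp; omega)
          (by omega)
          (fun h => hknn h)
          hbound'
          (fun _ => hn1)
          (hextend hfeasnew)
        rw [hplen1] at ihres
        exact ihres


theorem Bchar (n k : Int) (enemy : List Int) (hnn : ∀ x ∈ enemy, 0 ≤ x) :
    ∀ (N : Nat) (lo hi : Int), (hi - lo).toNat ≤ N → 0 ≤ lo → hi ≤ (enemy.length : Int) → lo ≤ hi →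
      (∀ m : Int, 1 ≤ m → m ≤ lo → feasP n k enemy m) →
      (∀ m : Int, hi < m → m ≤ (enemy.length : Int) → ¬ feasP n k enemy m) →
      ResChar n k enemy (bSearch n k enemy lo hi) := by
  intro N
  induction N with
  | zero =>
    intro lo hi hN h0 hlen hlohi H1 H2
    have hEq : lo = hi := by omega
    rw [bSearch]
    rw [dif_neg (by omega)]
    refine ⟨fun m h1 h2 => H1 m h1 h2, ?_, by omega, by omega⟩
    by_cases hl : lo = (enemy.length : Int)
    · exact Or.inl hl
    · exact Or.inr (H2 (lo + 1) (by omega) (by omega))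
  | succ N' ih =>
    intro lo hi hN h0 hlen hlohi H1 H2
    rw [bSearch]
    by_cases hlt : lo < hi
    · rw [dif_pos hlt]
      obtain ⟨hm1, hm2⟩ := bSearch_mid_bounds hlt
      set mid := PySem.Int.floordiv (lo + hi + 1) 2 with hmid
      by_cases hf : bFeasible n k enemy mid
      · rw [if_pos hf]
        have hfeas : feasP n k enemy mid := (bFeasible_eq n k enemy mid (by omega)).mp hf
        exact ih mid hi (by omega) (by omega) hlen (by omega)
          (fun m h1 h2 => feas_chain n k enemy hnn mid m h1 h2 hfeas) H2
      · rw [if_neg hf]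
        have hnfeas : ¬ feasP n k enemy mid := fun hc =>
          hf ((bFeasible_eq n k enemy mid (by omega)).mpr hc)
        apply ih lo (mid - 1) (by omega) (by omega) (by omega) (by omega) H1
        intro m hm hmlen hfm
        rcases le_or_gt m hi with hmh | hmh
        · exact hnfeas (feas_chain n k enemy hnn m mid (by omega) (by omega) hfm)
        · exact H2 m hmh hmlen hfm
    · rw [dif_neg hlt]
      refine ⟨fun m h1 h2 => H1 m h1 h2, ?_, by omega, by omega⟩
      by_cases hl : lo = (enemy.length : Int)
      · exact Or.inl hl
      · exact Or.inr (H2 (lo + 1) (by omega) (by omega))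

-- ===== VERDICT (by name: the statement is the Claim_ definition above) =====
theorem solution_spec : Claim_equal_solution := by
  intro n k enemy _hdom hpre
  unfold Spec_solution solution solution_alt
  by_cases hs : enemy.sum ≤ n
  · simp [hs]
  · simp only [hs, if_false]
    have hA : ResChar n k enemy (solutionGo n k [] (((List.nil : List Int)).length : Int) enemy (enemy.length : Int)) := by
      apply Achar n k enemy hpre enemy [] [] (0 : Multiset Int) n k
      · simp
      · simp
      · simp
      · simp
      · intro h; exact absurd rfl h
      · intro h; exact absurd rfl h
      · intro h; exact absurd rfl h
      · intro m h1 h2; simp at h2; omega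
    simp only [List.length_nil, Nat.cast_zero] at hA
    have hB : ResChar n k enemy (bSearch n k enemy 0 (enemy.length : Int)) := by
      apply Bchar n k enemy hpre ((enemy.length : Int) - 0).toNat 0 (enemy.length : Int)
      · omega
      · omega
      · omega
      · omega
      · intro m h1 h2; omega
      · intro m h1 h2; omega
    exact CharP_unique n k enemy _ _ hA hB
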